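-- pv_equiv track=rewrite | github.com/yanxiangtianji/Neuron | dataAnalysis/difference.py | cal_matrix_from_vc_pair
-- ===== SOURCE A (Python) =====
-- def cal_matrix_from_vc_pair(vc_list_data):
-- 	#
-- 	length=len(vc_list_data)
-- 	temp={}
-- 	num=0
-- 	for line in vc_list_data:
-- 		for v,c in line:
-- 			temp.setdefault(v,[0 for i in range(length)])[num]=c
-- 		num+=1
-- 	res=[]
-- 	for v,counts in sorted(temp.items()):
-- 		t=[v]
-- 		t.extend(c for c in counts)
-- 		res.append(t)
-- 	return res
-- ===== SOURCE B (Python) =====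
-- def _last_count(line, v):
--     c = 0
--     for w, d in line:
--         if w == v:
--             c = d
--     return c
--
--
-- def cal_matrix_from_vc_pair(vc_list_data):
--     values = sorted({v for line in vc_list_data for v, _ in line})
--     return [[v] + [_last_count(line, v) for line in vc_list_data] for v in values]
-- ===== Notes on version B (the rewrite author's own statement) =====
-- stated objective: simpler
-- what changed: Replaces the mutable dict-of-rows with index bookkeeping by a declarative two-phase form: collect and sort the distinct values, then build each row directly as one last-occurrence scan per line, with no dict, no preallocated zero rows and no in-place index writes.
import Mathlib
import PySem

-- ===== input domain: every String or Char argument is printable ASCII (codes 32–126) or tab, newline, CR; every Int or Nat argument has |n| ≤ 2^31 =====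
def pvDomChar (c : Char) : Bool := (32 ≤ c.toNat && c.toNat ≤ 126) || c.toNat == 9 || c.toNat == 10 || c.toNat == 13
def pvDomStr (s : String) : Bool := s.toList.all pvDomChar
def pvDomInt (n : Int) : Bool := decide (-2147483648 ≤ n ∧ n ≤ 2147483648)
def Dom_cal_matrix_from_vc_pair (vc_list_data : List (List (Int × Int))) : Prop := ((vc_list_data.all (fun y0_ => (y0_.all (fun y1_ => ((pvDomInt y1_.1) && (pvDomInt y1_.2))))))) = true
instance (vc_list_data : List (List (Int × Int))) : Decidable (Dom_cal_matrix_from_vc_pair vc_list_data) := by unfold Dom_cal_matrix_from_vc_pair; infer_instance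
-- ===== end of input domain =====

-- B replaces A's mutable dict of preallocated zero rows (written in place by line index) with a
-- declarative two-phase form: sort the distinct values, then build each row directly by one
-- last-occurrence scan per line (objective: simpler; no speed claim).

-- ===== PORT A =====
-- temp.setdefault(v, [0 for i in range(length)])[num] = c
def pvAStep (length num : Nat) (d : PySem.Dict Int (List Int)) (p : Int × Int) :
    PySem.Dict Int (List Int) :=
  let d' := d.setdefault p.1 (List.replicate length (0 : Int))
  d'.insert p.1 ((d'.getD p.1 []).set num p.2)

-- for line in vc_list_data: for v,c in line: …; num += 1
def pvALoop (length : Nat) :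
    List (List (Int × Int)) → PySem.Dict Int (List Int) → Nat → PySem.Dict Int (List Int)
  | [], temp, _ => temp
  | line :: rest, temp, num => pvALoop length rest (line.foldl (pvAStep length num) temp) (num + 1)

def cal_matrix_from_vc_pair (vc_list_data : List (List (Int × Int))) : List (List Int) :=
  let length := vc_list_data.length
  let temp := pvALoop length vc_list_data PySem.Dict.empty 0
  -- sorted(temp.items()): tuples compare component-wise and the dict keys are distinct, so the
  -- first component alone decides the order — ported as sorting by the key component.
  (PySem.List.sorted temp.items (fun it => it.1) false).foldl
    (fun res it => res ++ [it.1 :: it.2]) []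

-- ===== PORT B =====
def lastCount (line : List (Int × Int)) (v : Int) : Int :=
  line.foldl (fun c p => if p.1 == v then p.2 else c) 0

def cal_matrix_from_vc_pair_alt (vc_list_data : List (List (Int × Int))) : List (List Int) :=
  let values := PySem.List.sorted
    (PySem.Set.ofList (vc_list_data.flatMap (fun line => line.map Prod.fst)))
    (fun x => x) false
  values.map (fun v => v :: vc_list_data.map (fun line => lastCount line v))

-- ===== PRECONDITION & SPEC =====
def Spec_cal_matrix_from_vc_pair (vc_list_data : List (List (Int × Int))) (out : List (List Int)) : Prop := out = cal_matrix_from_vc_pair_alt vc_list_data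
instance (vc_list_data : List (List (Int × Int))) (out : List (List Int)) : Decidable (Spec_cal_matrix_from_vc_pair vc_list_data out) := by unfold Spec_cal_matrix_from_vc_pair; infer_instance

-- ===== CLAIM (what is proved, stated in full; the proofs are below) =====
def Claim_equal_cal_matrix_from_vc_pair : Prop := ∀ (vc_list_data : List (List (Int × Int))), Dom_cal_matrix_from_vc_pair vc_list_data → Spec_cal_matrix_from_vc_pair vc_list_data (cal_matrix_from_vc_pair vc_list_data)

-- ===== LEMMAS AND PROOFS =====

-- the row of value v after A has processed the given lines, starting from list l at position num
def pvRowLoop (v : Int) : List (List (Int × Int)) → List Int → Nat → List Int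
  | [], l, _ => l
  | line :: rest, l, num =>
      pvRowLoop v rest (line.foldl (fun l p => if p.1 == v then l.set num p.2 else l) l) (num + 1)

theorem pvAStep_getD (len num : Nat) (d : PySem.Dict Int (List Int)) (p : Int × Int) (v : Int) :
    (pvAStep len num d p).getD v (List.replicate len 0) =
      if p.1 == v then (d.getD v (List.replicate len 0)).set num p.2
      else d.getD v (List.replicate len 0) := by
  by_cases h : p.1 = v
  · subst h
    simp only [pvAStep, beq_self_eq_true, if_true, PySem.Dict.getD_insert_self]
    rw [PySem.Dict.getD_eq_get?_getD, PySem.Dict.get?_setdefault_self,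
        PySem.Dict.getD_eq_get?_getD]
    cases d.get? p.1 <;> simp
  · have h' : v ≠ p.1 := Ne.symm h
    simp only [pvAStep, beq_iff_eq, if_neg h]
    rw [PySem.Dict.getD_insert_of_ne _ _ _ h', PySem.Dict.getD_eq_get?_getD,
        PySem.Dict.get?_setdefault_of_ne _ _ h', PySem.Dict.getD_eq_get?_getD]

theorem pvAStep_keys (len num : Nat) (d : PySem.Dict Int (List Int)) (p : Int × Int) :
    (pvAStep len num d p).keys = PySem.Set.add d.keys p.1 := by
  by_cases h : d.contains p.1 = true
  · rw [pvAStep, PySem.Dict.setdefault_of_contains _ _ h,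
        PySem.Dict.keys_insert_of_contains _ _ h,
        PySem.Set.add_of_mem ((PySem.Dict.contains_iff_mem_keys d p.1).1 h)]
  · have h0 : d.contains p.1 = false := by revert h; cases d.contains p.1 <;> simp
    rw [pvAStep, PySem.Dict.setdefault_of_not_contains _ _ h0,
        PySem.Dict.keys_insert_of_contains _ _ (PySem.Dict.contains_insert_self d p.1 _),
        PySem.Dict.keys_insert_of_not_contains _ _ h0,
        PySem.Set.add_of_not_mem (fun hm => h ((PySem.Dict.contains_iff_mem_keys d p.1).2 hm))]

theorem pvline_getD (len num : Nat) (line : List (Int × Int)) (d : PySem.Dict Int (List Int)) (v : Int) :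
    (line.foldl (pvAStep len num) d).getD v (List.replicate len 0) =
      line.foldl (fun l p => if p.1 == v then l.set num p.2 else l)
        (d.getD v (List.replicate len 0)) := by
  induction line generalizing d with
  | nil => rfl
  | cons p rest ih =>
    simp only [List.foldl_cons, ih, pvAStep_getD]

theorem pvALoop_getD (len : Nat) (rest : List (List (Int × Int)))
    (d : PySem.Dict Int (List Int)) (num : Nat) (v : Int) :
    (pvALoop len rest d num).getD v (List.replicate len 0) =
      pvRowLoop v rest (d.getD v (List.replicate len 0)) num := by
  induction rest generalizing d num with
  | nil => rfl
  | cons line rest ih => simp only [pvALoop, pvRowLoop, ih, pvline_getD]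

theorem pvline_set (v : Int) (line : List (Int × Int)) (l₁ t : List Int) (x : Int) :
    line.foldl (fun l p => if p.1 == v then l.set l₁.length p.2 else l) (l₁ ++ x :: t) =
      l₁ ++ (line.foldl (fun c p => if p.1 == v then p.2 else c) x) :: t := by
  induction line generalizing x with
  | nil => rfl
  | cons p rest ih =>
    simp only [List.foldl_cons]
    by_cases h : p.1 == v
    · simp only [h, if_true, List.set_append, lt_self_iff_false, if_false, Nat.sub_self,
        List.set_cons_zero]
      exact ih p.2
    · simp only [h]
      exact ih x

theorem pvRowLoop_eq_map (v : Int) (rest : List (List (Int × Int))) (l₁ : List Int) :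
    pvRowLoop v rest (l₁ ++ List.replicate rest.length 0) l₁.length =
      l₁ ++ rest.map (fun line => lastCount line v) := by
  induction rest generalizing l₁ with
  | nil => simp [pvRowLoop]
  | cons line rest ih =>
    simp only [pvRowLoop, List.length_cons, List.replicate_succ, pvline_set]
    have h1 : l₁ ++ (lastCount line v) :: List.replicate rest.length 0
        = (l₁ ++ [lastCount line v]) ++ List.replicate rest.length 0 := by simp
    have h2 : l₁.length + 1 = (l₁ ++ [lastCount line v]).length := by simp
    rw [show line.foldl (fun c p => if p.1 == v then p.2 else c) 0 = lastCount line v from rfl,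
        h1, h2, ih]
    simp

theorem pvline_keys (len num : Nat) (line : List (Int × Int)) (d : PySem.Dict Int (List Int)) :
    (line.foldl (pvAStep len num) d).keys = PySem.Set.update d.keys (line.map Prod.fst) := by
  induction line generalizing d with
  | nil => rfl
  | cons p rest ih =>
    simp only [List.foldl_cons, List.map_cons, PySem.Set.update_cons, ih, pvAStep_keys]

theorem pvALoop_keys (len : Nat) (rest : List (List (Int × Int)))
    (d : PySem.Dict Int (List Int)) (num : Nat) :
    (pvALoop len rest d num).keys =
      PySem.Set.update d.keys (rest.flatMap (fun l => l.map Prod.fst)) := by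
  induction rest generalizing d num with
  | nil => rfl
  | cons line rest ih =>
    simp only [pvALoop, List.flatMap_cons, PySem.Set.update_append, ih, pvline_keys]

theorem pvFlatten_map_singleton (l : List Int) (f : Int → List Int) :
    (l.map (fun x => [f x])).flatten = l.map f := by
  induction l with
  | nil => rfl
  | cons a l ih => simp [ih]

theorem pv_main_eq (vc : List (List (Int × Int))) :
    cal_matrix_from_vc_pair vc = cal_matrix_from_vc_pair_alt vc := by
  simp only [cal_matrix_from_vc_pair, cal_matrix_from_vc_pair_alt]
  have hkeys : (pvALoop vc.length vc PySem.Dict.empty 0).keys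
      = PySem.Set.ofList (vc.flatMap (fun line => line.map Prod.fst)) := by
    rw [pvALoop_keys]
    simp [PySem.Set.update_nil_left]
  have hnd : (pvALoop vc.length vc PySem.Dict.empty 0).keys.Nodup := by
    rw [hkeys]; exact PySem.Set.nodup_ofList _
  have hrow' : (fun k => (k, (pvALoop vc.length vc PySem.Dict.empty 0).getD k
        (List.replicate vc.length 0)))
      = (fun v => (v, vc.map (fun line => lastCount line v))) := by
    funext v
    rw [pvALoop_getD, PySem.Dict.getD_empty]
    have h := pvRowLoop_eq_map v vc ([] : List Int)
    simpa using h
  have hitems := PySem.Dict.items_eq_map_keys _ hnd (List.replicate vc.length 0)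
  have hsorted : PySem.List.sorted (pvALoop vc.length vc PySem.Dict.empty 0).items
        (fun it => it.1) false
      = (PySem.List.sorted
          (PySem.Set.ofList (vc.flatMap (fun line => line.map Prod.fst))) (fun x => x) false).map
          (fun v => (v, vc.map (fun line => lastCount line v))) := by
    apply PySem.List.sorted_eq_of_perm_of_pairwise_lt
    · rw [hitems, hrow', hkeys]
      exact (PySem.List.sorted_perm _ _ _).map _
    · exact (List.pairwise_map).2
        ((PySem.List.sorted_ofList_pairwise_lt _).imp (fun h => h))
  rw [hsorted]
  simp [List.foldl_map, pvFlatten_map_singleton]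

-- ===== VERDICT (by name: the statement is the Claim_ definition above) =====
theorem cal_matrix_from_vc_pair_spec : Claim_equal_cal_matrix_from_vc_pair := by
  intro vc _
  exact pv_main_eq vc
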